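-- pv_equiv track=rewrite | github.com/parkavai/IN3110 | assignment4/time_planner.py | filter_data_uio
-- ===== SOURCE A (Python) =====
-- def filter_data_uio(keys: list, data: list, wanted: list):
--     """Filters away the columns not specified in wanted argument
--
--     Used for UiO only since there is differences between how
--     the UiO is structured and the wiki page. Because of this,
--     i had to create a separate function in order to get the
--     values correctly sorted for the UiO part.
--
--     arguments:
--         keys (list of strings) : list of all column names
--         data (list of lists) : data with rows and columns
--         wanted (list of strings) : list of wanted columns
--     return:
--         filtered_data (list of lists) : the filtered data
--             This is the subset of data in `data`,
--             after discarding the columns not in `wanted`.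
--     """
--     event = {}
--     for key in wanted:
--         event[key] = []
--     # Date, Venue and Type is the order
--     for row in data:
--         i = 0
--         for element in row:
--             # The first element of the row is always a date in the uio
--             if(i == 0):
--                 event["Date"].append(element)
--             # After date comes venue
--             elif(i == 1):
--                 event["Venue"].append(element)
--             # In the end is a type
--             elif(i == 2):
--                 event["Type"].append(element)
--             i += 1
--     return event
-- ===== SOURCE B (Python) =====
-- def filter_data_uio(keys, data, wanted):
--     """Column-by-column reshape: same result as the row-major original."""
--     event = {key: [] for key in wanted}
--     for i, name in enumerate(("Date", "Venue", "Type")):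
--         for row in data:
--             if len(row) > i:
--                 event[name].append(row[i])
--     return event
-- ===== Notes on version B (the rewrite author's own statement) =====
-- stated objective: alternative
-- what changed: B transposes column-by-column: for each of the three fixed column names it makes one pass over the rows appending row[i] when the row is long enough, instead of A's row-by-row walk with a running position counter.
import Mathlib
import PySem

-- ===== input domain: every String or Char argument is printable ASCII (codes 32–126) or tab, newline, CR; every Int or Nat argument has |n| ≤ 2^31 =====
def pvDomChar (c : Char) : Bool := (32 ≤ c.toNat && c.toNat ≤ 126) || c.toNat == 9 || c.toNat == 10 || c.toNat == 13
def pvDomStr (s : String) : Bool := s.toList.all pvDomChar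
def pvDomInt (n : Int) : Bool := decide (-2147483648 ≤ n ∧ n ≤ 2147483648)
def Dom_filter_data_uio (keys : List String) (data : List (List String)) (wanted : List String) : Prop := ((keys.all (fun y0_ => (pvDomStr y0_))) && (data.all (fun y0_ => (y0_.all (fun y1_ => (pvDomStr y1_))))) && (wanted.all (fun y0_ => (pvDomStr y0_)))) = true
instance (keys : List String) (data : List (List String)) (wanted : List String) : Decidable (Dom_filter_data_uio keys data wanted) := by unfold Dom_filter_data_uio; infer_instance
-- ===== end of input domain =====

-- B transposes column-by-column (one pass over the rows per fixed column name) instead of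
-- A's row-by-row walk with a position counter; same result, no speed claim.

-- ===== PORT A =====
-- A's inner loop body: the counter i selects which column list receives the element.
-- event["Date"].append(..) raises KeyError when the key is absent: those inputs are outside
-- Pre_filter_data_uio; there the total primitive Dict.modify inserts instead (exact on Pre_).
def pvAStep (st : PySem.Dict String (List String) × Int) (element : String) :
    PySem.Dict String (List String) × Int :=
  (if st.2 == 0 then st.1.modify "Date" [] (fun v => v ++ [element])
   else if st.2 == 1 then st.1.modify "Venue" [] (fun v => v ++ [element])
   else if st.2 == 2 then st.1.modify "Type" [] (fun v => v ++ [element])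
   else st.1,
   st.2 + 1)

def filter_data_uio (keys : List String) (data : List (List String)) (wanted : List String) :
    List (String × List String) :=
  let event := wanted.foldl (fun d key => d.insert key ([] : List String)) PySem.Dict.empty
  let event := data.foldl (fun d row => (row.foldl pvAStep (d, (0 : Int))).1) event
  event.items

-- ===== PORT B =====
-- one pass over data for column (index, name): append row[i] whenever len(row) > i
def pvBCol (data : List (List String)) (d : PySem.Dict String (List String)) (p : Int × String) :
    PySem.Dict String (List String) :=
  data.foldl (fun d row =>
    if p.1 < PySem.List.len row then d.modify p.2 [] (fun v => v ++ [PySem.List.pyGetD row p.1 ""])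
    else d) d

def filter_data_uio_alt (keys : List String) (data : List (List String)) (wanted : List String) :
    List (String × List String) :=
  let event := PySem.Dict.ofList (wanted.map (fun key => (key, ([] : List String))))
  let event := (PySem.List.enumerate ["Date", "Venue", "Type"]).foldl (pvBCol data) event
  event.items

-- ===== PRECONDITION & SPEC =====
-- Pre_ excludes exactly the inputs on which Python A raises KeyError: a column name whose
-- column is reached by some row but which is missing from `wanted`.
def Pre_filter_data_uio (keys : List String) (data : List (List String)) (wanted : List String) : Prop :=
  ((∃ row ∈ data, 1 ≤ row.length) → "Date" ∈ wanted) ∧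
  ((∃ row ∈ data, 2 ≤ row.length) → "Venue" ∈ wanted) ∧
  ((∃ row ∈ data, 3 ≤ row.length) → "Type" ∈ wanted)
instance (keys : List String) (data : List (List String)) (wanted : List String) : Decidable (Pre_filter_data_uio keys data wanted) := by unfold Pre_filter_data_uio; infer_instance

def pvWitness_filter_data_uio : List String × List (List String) × List String :=
  (["x"], [["a", "b", "c"], ["d"]], ["Date", "Venue", "Type"])

def Spec_filter_data_uio (keys : List String) (data : List (List String)) (wanted : List String) (out : List (String × List String)) : Prop := out = filter_data_uio_alt keys data wanted
instance (keys : List String) (data : List (List String)) (wanted : List String) (out : List (String × List String)) : Decidable (Spec_filter_data_uio keys data wanted out) := by unfold Spec_filter_data_uio; infer_instance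

-- ===== CLAIM (what is proved, stated in full; the proofs are below) =====
def Claim_equal_filter_data_uio : Prop := ∀ (keys : List String) (data : List (List String)) (wanted : List String), Dom_filter_data_uio keys data wanted → Pre_filter_data_uio keys data wanted → Spec_filter_data_uio keys data wanted (filter_data_uio keys data wanted)

-- ===== LEMMAS AND PROOFS =====

-- the i-th column: elements row[i] of the rows that are long enough, in row order
def pvCol (i : Nat) (data : List (List String)) : List String :=
  data.filterMap (fun row => row[i]?)

-- A's work, flattened into (column name, element) pairs in A's processing order
def pvPairs (data : List (List String)) : List (String × String) :=
  data.flatMap (fun row => List.zip ["Date", "Venue", "Type"] row)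

lemma pvAStep_tail (rest : List String) (d : PySem.Dict String (List String)) (i : Int)
    (h : 3 ≤ i) : rest.foldl pvAStep (d, i) = (d, i + rest.length) := by
  induction rest generalizing i with
  | nil => simp
  | cons a t ih =>
    have h0 : (i == (0 : Int)) = false := by simp; omega
    have h1 : (i == (1 : Int)) = false := by simp; omega
    have h2 : (i == (2 : Int)) = false := by simp; omega
    have hstep : pvAStep (d, i) a = (d, i + 1) := by simp [pvAStep, h0, h1, h2]
    rw [List.foldl_cons, hstep, ih (i + 1) (by omega)]
    simp; ring

lemma pvARow_eq (row : List String) (d : PySem.Dict String (List String)) :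
    (row.foldl pvAStep (d, (0 : Int))).1 =
      (List.zip ["Date", "Venue", "Type"] row).foldl
        (fun d p => d.modify p.1 [] fun x => x ++ [p.2]) d := by
  match row with
  | [] => rfl
  | [a] => simp [pvAStep]
  | [a, b] => simp [pvAStep]
  | [a, b, c] => simp [pvAStep]
  | a :: b :: c :: e :: rest =>
    have h3 : pvAStep (pvAStep (pvAStep (d, (0 : Int)) a) b) c =
        (((d.modify "Date" [] fun x => x ++ [a]).modify "Venue" [] fun x => x ++ [b]).modify
          "Type" [] fun x => x ++ [c], (3 : Int)) := by
      simp [pvAStep]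
    rw [List.foldl_cons, List.foldl_cons, List.foldl_cons, show
      pvAStep (pvAStep (pvAStep (d, (0:Int)) a) b) c = _ from h3,
      pvAStep_tail (e :: rest) _ 3 (by norm_num)]
    simp

lemma pvA_chain (data : List (List String)) (d : PySem.Dict String (List String)) :
    data.foldl (fun d row => (row.foldl pvAStep (d, (0 : Int))).1) d =
      (pvPairs data).foldl (fun d p => d.modify p.1 [] fun x => x ++ [p.2]) d := by
  induction data generalizing d with
  | nil => rfl
  | cons row rows ih =>
    simp only [pvPairs, List.flatMap_cons, List.foldl_append, List.foldl_cons]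
    rw [pvARow_eq]
    exact ih _

lemma pvBCol_eq (i : Nat) (nm : String) (data : List (List String))
    (d : PySem.Dict String (List String)) :
    pvBCol data d ((i : Int), nm) =
      ((pvCol i data).map (fun x => (nm, x))).foldl
        (fun d p => d.modify p.1 [] fun x => x ++ [p.2]) d := by
  induction data generalizing d with
  | nil => simp [pvBCol, pvCol]
  | cons row rows ih =>
    have hstep : pvBCol (row :: rows) d ((i : Int), nm) =
        pvBCol rows (if (i : Int) < PySem.List.len row then
          d.modify nm [] (fun v => v ++ [PySem.List.pyGetD row (i : Int) ""]) else d)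
          ((i : Int), nm) := rfl
    rw [hstep]
    by_cases h : i < row.length
    · have hc : ((i : Int) < PySem.List.len row) := by
        rw [PySem.List.len_eq]; exact_mod_cast h
      have hg : PySem.List.pyGetD row (i : Int) "" = row[i] := by
        simp [PySem.List.pyGetD_natCast]; exact List.getD_eq_getElem row "" h
      have hge : row[i]? = some row[i] := List.getElem?_eq_getElem h
      have hcol : pvCol i (row :: rows) = row[i] :: pvCol i rows := by
        simp [pvCol, hge]
      rw [if_pos hc, hg, ih, hcol, List.map_cons, List.foldl_cons]
    · have hc : ¬ ((i : Int) < PySem.List.len row) := by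
        rw [PySem.List.len_eq]; exact_mod_cast h
      have hge : row[i]? = none := by simp; omega
      have hcol : pvCol i (row :: rows) = pvCol i rows := by
        simp [pvCol, hge]
      rw [if_neg hc, ih, hcol]

lemma pvBCol_eq0 (data : List (List String)) (d : PySem.Dict String (List String)) :
    pvBCol data d (0, "Date") =
      ((pvCol 0 data).map (fun x => ("Date", x))).foldl
        (fun d p => d.modify p.1 [] fun x => x ++ [p.2]) d := by
  simpa using pvBCol_eq 0 "Date" data d

lemma pvBCol_eq1 (data : List (List String)) (d : PySem.Dict String (List String)) :
    pvBCol data d (1, "Venue") =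
      ((pvCol 1 data).map (fun x => ("Venue", x))).foldl
        (fun d p => d.modify p.1 [] fun x => x ++ [p.2]) d := by
  simpa using pvBCol_eq 1 "Venue" data d

lemma pvBCol_eq2 (data : List (List String)) (d : PySem.Dict String (List String)) :
    pvBCol data d (2, "Type") =
      ((pvCol 2 data).map (fun x => ("Type", x))).foldl
        (fun d p => d.modify p.1 [] fun x => x ++ [p.2]) d := by
  simpa using pvBCol_eq 2 "Type" data d

-- per-key slices of A's pair stream: they are exactly B's columns
lemma pvFilter_date (data : List (List String)) :
    ((pvPairs data).filter (fun p => p.1 == "Date")).map (fun x => x.2) = pvCol 0 data := by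
  induction data with
  | nil => rfl
  | cons row rows ih =>
    rcases row with _ | ⟨a, _ | ⟨b, _ | ⟨c, rest⟩⟩⟩ <;>
      simp_all [pvPairs, pvCol]

lemma pvFilter_venue (data : List (List String)) :
    ((pvPairs data).filter (fun p => p.1 == "Venue")).map (fun x => x.2) = pvCol 1 data := by
  induction data with
  | nil => rfl
  | cons row rows ih =>
    rcases row with _ | ⟨a, _ | ⟨b, _ | ⟨c, rest⟩⟩⟩ <;>
      simp_all [pvPairs, pvCol]

lemma pvFilter_type (data : List (List String)) :
    ((pvPairs data).filter (fun p => p.1 == "Type")).map (fun x => x.2) = pvCol 2 data := by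
  induction data with
  | nil => rfl
  | cons row rows ih =>
    rcases row with _ | ⟨a, _ | ⟨b, _ | ⟨c, rest⟩⟩⟩ <;>
      simp_all [pvPairs, pvCol]

lemma pvFilter_other (data : List (List String)) (k : String)
    (hD : k ≠ "Date") (hV : k ≠ "Venue") (hT : k ≠ "Type") :
    (pvPairs data).filter (fun p => p.1 == k) = [] := by
  induction data with
  | nil => rfl
  | cons row rows ih =>
    rcases row with _ | ⟨a, _ | ⟨b, _ | ⟨c, rest⟩⟩⟩ <;>
      simp_all [pvPairs, Ne.symm hD, Ne.symm hV, Ne.symm hT] <;> exact ih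

-- a column list, filtered by key: either the whole column or nothing
lemma pvColFilter (nm k : String) (l : List String) :
    ((l.map (fun x => (nm, x))).filter (fun p => p.1 == k)).map (fun x => x.2) =
      if nm = k then l else [] := by
  by_cases h : nm = k <;> simp [List.filter_map, Function.comp_def, h]

-- every key A touches is named by Pre_
lemma pvPairs_fst_mem (data : List (List String)) (wanted : List String)
    (hP : Pre_filter_data_uio [] data wanted) :
    ∀ p ∈ pvPairs data, p.1 ∈ wanted := by
  obtain ⟨h1, h2, h3⟩ := hP
  intro p hp
  simp only [pvPairs, List.mem_flatMap] at hp
  obtain ⟨row, hrow, hz⟩ := hp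
  rw [List.mem_iff_getElem] at hz
  obtain ⟨j, hj, hget⟩ := hz
  rw [List.length_zip, lt_min_iff] at hj
  obtain ⟨hj3, hjr⟩ := hj
  have hj3' : j < 3 := by simpa using hj3
  have hfst : p.1 = (["Date", "Venue", "Type"] : List String)[j]'(by simpa using hj3') := by
    rw [← hget]; simp [List.getElem_zip]
  interval_cases j
  · rw [hfst]; exact h1 ⟨row, hrow, by omega⟩
  · rw [hfst]; exact h2 ⟨row, hrow, by omega⟩
  · rw [hfst]; exact h3 ⟨row, hrow, by omega⟩

lemma pvUpdate_self (s : PySem.Set String) (xs : List String) (h : ∀ x ∈ xs, x ∈ s) :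
    PySem.Set.update s xs = s := by
  rw [PySem.Set.update_eq_append_filter]
  have hnil : (PySem.Set.ofList xs).filter (fun y => !s.contains y) = [] := by
    rw [List.filter_eq_nil_iff]
    intro y hy
    have hm : y ∈ s := h y ((PySem.Set.mem_ofList _ _).mp hy)
    simp [PySem.Set.contains, hm]
  rw [hnil, List.append_nil]

lemma pvInitA_getD (w : List String) (d : PySem.Dict String (List String)) (k : String)
    (h : d.getD k [] = []) :
    (w.foldl (fun d key => d.insert key ([] : List String)) d).getD k [] = [] := by
  induction w generalizing d with
  | nil => exact h
  | cons a t ih =>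
    rw [List.foldl_cons]
    apply ih
    rw [PySem.Dict.getD_insert]
    split_ifs <;> simp [h]

lemma pvInitB_getD (w : List String) (k : String) :
    (PySem.Dict.ofList (w.map (fun key => (key, ([] : List String))))).getD k [] = [] := by
  have aux : ∀ (l : List (String × List String)) (d : PySem.Dict String (List String)),
      d.getD k [] = [] → (∀ p ∈ l, p.2 = ([] : List String)) →
      (l.foldl (fun d p => d.insert p.1 p.2) d).getD k [] = [] := by
    intro l
    induction l with
    | nil => intro d h _; exact h
    | cons a t ih =>
      intro d h hall
      rw [List.foldl_cons]
      apply ih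
      · rw [PySem.Dict.getD_insert]
        split_ifs
        · exact hall a (by simp)
        · exact h
      · intro p hp; exact hall p (by simp [hp])
  exact aux _ PySem.Dict.empty (by simp) (by simp)

lemma pvInitB_keys (w : List String) :
    (PySem.Dict.ofList (w.map (fun key => (key, ([] : List String))))).keys =
      PySem.Set.ofList w := by
  have : (PySem.Dict.ofList (w.map (fun key => (key, ([] : List String))))) =
      ((w.map (fun key => (key, ([] : List String)))).foldl
        (fun d p => d.insert p.1 ((fun (_ : PySem.Dict String (List String))
          (p : String × List String) => p.2) d p)) PySem.Dict.empty) := rfl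
  rw [this, PySem.Dict.keys_foldl_insert_key, PySem.Dict.keys_empty]
  have hm : List.map Prod.fst (List.map (fun key => (key, ([] : List String))) w) = w := by
    simp [Function.comp_def]
  rw [hm]
  exact PySem.Set.update_nil_left w

lemma pvInitA_keys (w : List String) :
    (w.foldl (fun d key => d.insert key ([] : List String)) PySem.Dict.empty).keys =
      PySem.Set.ofList w := by
  have : (w.foldl (fun d key => d.insert key ([] : List String)) PySem.Dict.empty) =
      (w.foldl (fun d key => d.insert key ((fun (_ : PySem.Dict String (List String))
        (_ : String) => ([] : List String)) d key)) PySem.Dict.empty) := rfl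
  rw [this, PySem.Dict.keys_foldl_insert, PySem.Dict.keys_empty]
  exact PySem.Set.update_nil_left w

-- keys of a modify-fold whose keys all lie in the dict already
lemma pvFoldKeys (l : List (String × String)) (d : PySem.Dict String (List String))
    (h : ∀ p ∈ l, p.1 ∈ d.keys) :
    (l.foldl (fun d p => d.modify p.1 [] fun x => x ++ [p.2]) d).keys = d.keys := by
  rw [PySem.Dict.keys_foldl_modify_key l Prod.fst [] (fun _ p => fun x => x ++ [p.2]) d]
  exact pvUpdate_self _ _ (by intro x hx; obtain ⟨p, hp, rfl⟩ := List.mem_map.mp hx; exact h p hp)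

-- ===== VERDICT (by name: the statement is the Claim_ definition above) =====
theorem filter_data_uio_spec : Claim_equal_filter_data_uio := by
  intro keys data wanted _ hPre
  unfold Spec_filter_data_uio
  have hPre' : Pre_filter_data_uio [] data wanted := hPre
  obtain ⟨h1, h2, h3⟩ := hPre
  simp only [filter_data_uio, filter_data_uio_alt]
  rw [pvA_chain]
  rw [show PySem.List.enumerate ["Date", "Venue", "Type"] =
    [((0 : Int), "Date"), ((1 : Int), "Venue"), ((2 : Int), "Type")] from rfl]
  rw [List.foldl_cons, List.foldl_cons, List.foldl_cons, List.foldl_nil,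
    pvBCol_eq0, pvBCol_eq1, pvBCol_eq2]
  have hmemKW : ∀ x ∈ wanted, x ∈ PySem.Set.ofList wanted :=
    fun x hx => (PySem.Set.mem_ofList _ _).mpr hx
  -- column keys lie in wanted
  have hcol : ∀ (i : Nat) (nm : String), ((∃ row ∈ data, i + 1 ≤ row.length) → nm ∈ wanted) →
      ∀ q ∈ (pvCol i data).map (fun x => (nm, x)), q.1 ∈ wanted := by
    intro i nm hw q hq
    obtain ⟨v, hv, rfl⟩ := List.mem_map.mp hq
    obtain ⟨row, hrow, hsome⟩ := List.mem_filterMap.mp hv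
    obtain ⟨hlt, -⟩ := List.getElem?_eq_some_iff.mp hsome
    exact hw ⟨row, hrow, by omega⟩
  have m0 := hcol 0 "Date" (by simpa using h1)
  have m1 := hcol 1 "Venue" (by simpa using h2)
  have m2 := hcol 2 "Type" (by simpa using h3)
  -- B-side dicts, built up column by column
  have hk0 : (((pvCol 0 data).map (fun x => ("Date", x))).foldl
      (fun d p => d.modify p.1 [] fun x => x ++ [p.2])
      (PySem.Dict.ofList (wanted.map (fun key => (key, ([] : List String)))))).keys
        = PySem.Set.ofList wanted := by
    rw [pvFoldKeys _ _ (fun q hq => by rw [pvInitB_keys]; exact hmemKW _ (m0 q hq)),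
      pvInitB_keys]
  have hk1 : (((pvCol 1 data).map (fun x => ("Venue", x))).foldl
      (fun d p => d.modify p.1 [] fun x => x ++ [p.2])
      (((pvCol 0 data).map (fun x => ("Date", x))).foldl
        (fun d p => d.modify p.1 [] fun x => x ++ [p.2])
        (PySem.Dict.ofList (wanted.map (fun key => (key, ([] : List String))))))).keys
        = PySem.Set.ofList wanted := by
    rw [pvFoldKeys _ _ (fun q hq => by rw [hk0]; exact hmemKW _ (m1 q hq)), hk0]
  have hk2 : (((pvCol 2 data).map (fun x => ("Type", x))).foldl
      (fun d p => d.modify p.1 [] fun x => x ++ [p.2])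
      (((pvCol 1 data).map (fun x => ("Venue", x))).foldl
        (fun d p => d.modify p.1 [] fun x => x ++ [p.2])
        (((pvCol 0 data).map (fun x => ("Date", x))).foldl
          (fun d p => d.modify p.1 [] fun x => x ++ [p.2])
          (PySem.Dict.ofList (wanted.map (fun key => (key, ([] : List String)))))))).keys
        = PySem.Set.ofList wanted := by
    rw [pvFoldKeys _ _ (fun q hq => by rw [hk1]; exact hmemKW _ (m2 q hq)), hk1]
  -- A-side keys
  have hAkeys : ((pvPairs data).foldl (fun d p => d.modify p.1 [] fun x => x ++ [p.2])
      (wanted.foldl (fun d key => d.insert key ([] : List String)) PySem.Dict.empty)).keys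
        = PySem.Set.ofList wanted := by
    rw [pvFoldKeys _ _ (fun p hp => by
        rw [pvInitA_keys]; exact hmemKW _ (pvPairs_fst_mem data wanted hPre' p hp)),
      pvInitA_keys]
  -- per-key values agree
  have hget : ∀ k : String,
      ((pvPairs data).foldl (fun d p => d.modify p.1 [] fun x => x ++ [p.2])
        (wanted.foldl (fun d key => d.insert key ([] : List String)) PySem.Dict.empty)).getD k []
      = (((pvCol 2 data).map (fun x => ("Type", x))).foldl
          (fun d p => d.modify p.1 [] fun x => x ++ [p.2])
          (((pvCol 1 data).map (fun x => ("Venue", x))).foldl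
            (fun d p => d.modify p.1 [] fun x => x ++ [p.2])
            (((pvCol 0 data).map (fun x => ("Date", x))).foldl
              (fun d p => d.modify p.1 [] fun x => x ++ [p.2])
              (PySem.Dict.ofList (wanted.map (fun key => (key, ([] : List String)))))))).getD k []
      := by
    intro k
    rw [PySem.Dict.getD_foldl_modify_append, PySem.Dict.getD_foldl_modify_append,
      PySem.Dict.getD_foldl_modify_append, PySem.Dict.getD_foldl_modify_append,
      pvInitA_getD wanted PySem.Dict.empty k (by simp), pvInitB_getD]
    rw [pvColFilter, pvColFilter, pvColFilter]
    by_cases hD : k = "Date"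
    · subst hD
      rw [pvFilter_date]
      simp
    · by_cases hV : k = "Venue"
      · subst hV
        rw [pvFilter_venue]
        simp
      · by_cases hT : k = "Type"
        · subst hT
          rw [pvFilter_type]
          simp
        · rw [pvFilter_other data k hD hV hT]
          simp [Ne.symm hD, Ne.symm hV, Ne.symm hT]
  rw [PySem.Dict.items_eq_map_keys _
      (by rw [hAkeys]; exact PySem.Set.nodup_ofList wanted) ([] : List String),
    PySem.Dict.items_eq_map_keys _
      (by rw [hk2]; exact PySem.Set.nodup_ofList wanted) ([] : List String),
    hAkeys, hk2]
  exact List.map_congr_left (fun k _ => by rw [hget k])
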